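-- pv_equiv track=rewrite | github.com/TheHappyBaloney/6Companies30DaysChallenge | Week 5 (Feb 11th - 18th)/SumScores.py | sumScores
-- ===== SOURCE A (Python) =====
-- def sumScores(s: str) -> int:
--     n = len(s)
--     dp = [0] * n
--     ans = [1] * n
--
--     i , j = 1 , 0
--
--     while i < n:
--         if s[i] == s[j]:
--             ans[i] += ans[j]
--             dp[i] = j + 1
--             i += 1
--             j += 1
--         else:
--             if j:
--                 j = dp[j - 1]
--             else:
--                 i += 1
--
--     return sum(ans)
-- ===== SOURCE B (Python) =====
-- def sumScores(s: str) -> int: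
--     # Sum over every start position of the longest common prefix of s and s[start:]
--     # (direct per-suffix comparison; structurally unlike A's KMP failure-table count).
--     n = len(s)
--     total = 0
--     for i in range(n):
--         k = 0
--         while i + k < n and s[i + k] == s[k]:
--             k += 1
--         total += k
--     return total
-- ===== Notes on version B (the rewrite author's own statement) =====
-- stated objective: alternative
-- what changed: Replaces A's fused KMP failure-table loop (which accumulates per-position counts of prefix occurrences via dp back-pointers) with a direct per-suffix scan: for each start position compute the longest common prefix of s and s[start:] by character comparison and sum these lengths.
import Mathlib
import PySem

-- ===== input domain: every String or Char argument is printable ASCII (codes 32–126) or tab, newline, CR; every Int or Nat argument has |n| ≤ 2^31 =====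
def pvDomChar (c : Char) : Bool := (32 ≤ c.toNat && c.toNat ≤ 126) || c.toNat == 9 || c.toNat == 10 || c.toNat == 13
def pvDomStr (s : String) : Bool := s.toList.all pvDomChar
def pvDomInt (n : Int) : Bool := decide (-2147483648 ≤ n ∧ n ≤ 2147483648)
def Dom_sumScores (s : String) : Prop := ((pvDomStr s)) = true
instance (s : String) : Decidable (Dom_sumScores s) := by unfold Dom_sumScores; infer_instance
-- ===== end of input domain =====

-- B computes the same total by a direct per-suffix longest-common-prefix scan instead of A's
-- KMP failure-table accumulation; objective: alternative (not faster), equivalence proved exactly.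

-- ===== PORT A =====
-- literal port of A's fused KMP while-loop; the fuel argument only makes the loop total
-- (2*n+1 steps provably suffice, see pvLoopA-lemmas below); Python str indexing is in range
-- at every access, so `l[i]?` comparison is exact here.
def pvLoopA (l : List Char) : ℕ → ℕ → ℕ → List ℕ → List ℕ → List ℕ
  | 0, _, _, _, ans => ans
  | fuel+1, i, j, dp, ans =>
    if i < l.length then
      if l[i]? = l[j]? then
        pvLoopA l fuel (i+1) (j+1) (dp.set i (j+1)) (ans.set i (ans.getD i 0 + ans.getD j 0))
      else if 0 < j then
        pvLoopA l fuel i (dp.getD (j-1) 0) dp ans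
      else
        pvLoopA l fuel (i+1) j dp ans
    else ans

def sumScores (s : String) : Int :=
  let l := s.toList
  let n := l.length
  ((pvLoopA l (2*n+1) 1 0 (List.replicate n 0) (List.replicate n 1)).sum : ℕ)

-- ===== PORT B =====
-- inner while-loop of Source B: extend k while s[i+k] == s[k]; indices are nonnegative and
-- checked in range before access, so ported by hand exactly with `l[·]?`.
def pvZGo (l : List Char) (i k : ℕ) : ℕ :=
  if h : i + k < l.length ∧ l[i+k]? = l[k]? then pvZGo l i (k+1) else k
termination_by l.length - (i + k)
decreasing_by omega

def sumScores_alt (s : String) : Int :=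
  let l := s.toList
  (((List.range l.length).foldl (fun t i => t + pvZGo l i 0) 0 : ℕ) : Int)

-- ===== PRECONDITION & SPEC =====
def Spec_sumScores (s : String) (out : Int) : Prop := out = sumScores_alt s
instance (s : String) (out : Int) : Decidable (Spec_sumScores s out) := by unfold Spec_sumScores; infer_instance

-- ===== CLAIM (what is proved, stated in full; the proofs are below) =====
def Claim_equal_sumScores : Prop := ∀ (s : String), Dom_sumScores s → Spec_sumScores s (sumScores s)

-- ===== LEMMAS AND PROOFS =====

-- `Mt l a b len`: the substrings of length `len` of `l` starting at `a` and at `b` agree.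
abbrev Mt (l : List Char) (a b len : ℕ) : Prop := ∀ k, k < len → l[a+k]? = l[b+k]?

-- number of prefixes of `l` that end exactly at index `e` (length `p`, 1 ≤ p ≤ e+1);
-- this is what A's `ans[e]` holds at the end.
def cB (l : List Char) (e : ℕ) : ℕ :=
  ((Finset.range (e+2)).filter (fun p => 1 ≤ p ∧ Mt l 0 (e+1-p) p)).card

-- KMP prefix function: longest proper border of the prefix of length `e+1`.
def piF (l : List Char) (e : ℕ) : ℕ := Nat.findGreatest (fun p => Mt l 0 (e+1-p) p) e

lemma mt_zero (l : List Char) (a b : ℕ) : Mt l a b 0 := by intro k hk; omega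

lemma mt_self (l : List Char) (a len : ℕ) : Mt l a a len := by intro k hk; rfl

lemma mt_symm {l : List Char} {a b len : ℕ} (h : Mt l a b len) : Mt l b a len :=
  fun k hk => (h k hk).symm

-- transfer along a border: if the prefix of length j is also the suffix of the prefix of
-- length i, then borders of length p ≤ j of the two prefixes coincide.
lemma mt_transfer {l : List Char} {i j p : ℕ} (hb : Mt l 0 (i-j) j) (hp : p ≤ j) (hj : j ≤ i) :
    (Mt l 0 (i-p) p ↔ Mt l 0 (j-p) p) := by
  have key : ∀ k, k < p → l[(j-p)+k]? = l[(i-p)+k]? := by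
    intro k hk
    have h1 := hb (j-p+k) (by omega)
    have e1 : i - j + (j - p + k) = i - p + k := by omega
    simp only [Nat.zero_add] at h1
    rw [e1] at h1
    exact h1
  constructor
  · intro h k hk
    have := h k hk
    rw [key k hk]; exact this
  · intro h k hk
    have := h k hk
    rw [← key k hk]; exact this

-- splitting off the last character of a border of the prefix of length i+1
lemma mt_ext {l : List Char} {i q : ℕ} (hq1 : 1 ≤ q) (hqi : q ≤ i+1) :
    (Mt l 0 (i+1-q) q ↔ (Mt l 0 (i-(q-1)) (q-1) ∧ l[q-1]? = l[i]?)) := by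
  constructor
  · intro h
    refine ⟨?_, ?_⟩
    · intro k hk
      have := h k (by omega)
      have e : i + 1 - q + k = i - (q-1) + k := by omega
      rw [e] at this
      exact this
    · have := h (q-1) (by omega)
      have e0 : 0 + (q-1) = q-1 := by omega
      have e : i + 1 - q + (q-1) = i := by omega
      rw [e0, e] at this
      exact this
  · rintro ⟨h, hc⟩ k hk
    rcases Nat.lt_or_ge k (q-1) with hk' | hk'
    · have := h k hk'
      have e : i - (q-1) + k = i + 1 - q + k := by omega
      rw [e] at this
      exact this
    · have ek : k = q - 1 := by omega
      subst ek
      have e0 : 0 + (q-1) = q-1 := by omega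
      have e : i + 1 - q + (q-1) = i := by omega
      rw [e0, e]
      exact hc

-- ===== B-side characterisation =====

lemma zGo_le (l : List Char) (i k : ℕ) : k ≤ pvZGo l i k := by
  unfold pvZGo
  split
  · have := zGo_le l i (k+1); omega
  · omega
termination_by l.length - (i + k)
decreasing_by omega

lemma zGo_matches (l : List Char) (i k : ℕ) :
    ∀ t, k ≤ t → t < pvZGo l i k → i + t < l.length ∧ l[i+t]? = l[t]? := by
  unfold pvZGo
  split
  · rename_i h
    intro t ht1 ht2
    rcases Nat.eq_or_lt_of_le ht1 with he | hlt
    · subst he; exact h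
    · exact zGo_matches l i (k+1) t hlt ht2
  · intro t ht1 ht2; omega
termination_by l.length - (i + k)
decreasing_by omega

lemma zGo_stop (l : List Char) (i k : ℕ) :
    ¬ (i + pvZGo l i k < l.length ∧ l[i + pvZGo l i k]? = l[pvZGo l i k]?) := by
  unfold pvZGo
  split
  · exact zGo_stop l i (k+1)
  · rename_i h; exact h
termination_by l.length - (i + k)
decreasing_by omega

lemma z_iff (l : List Char) (i : ℕ) (hi : i < l.length) (len : ℕ) :
    (len ≤ pvZGo l i 0 ↔ (i + len ≤ l.length ∧ Mt l i 0 len)) := by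
  constructor
  · intro h
    constructor
    · rcases Nat.eq_zero_or_pos len with h0 | h0
      · omega
      · have := zGo_matches l i 0 (len-1) (by omega) (by omega)
        omega
    · intro k hk
      have := zGo_matches l i 0 k (by omega) (by omega)
      simpa using this.2
  · rintro ⟨h1, h2⟩
    by_contra hlt
    push Not at hlt
    have hs := zGo_stop l i 0
    have hm := h2 (pvZGo l i 0) (by omega)
    simp only [Nat.zero_add] at hm
    exact hs ⟨by omega, hm⟩

lemma z_le (l : List Char) (i : ℕ) (hi : i < l.length) : i + pvZGo l i 0 ≤ l.length := by
  have := (z_iff l i hi (pvZGo l i 0)).mp le_rfl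
  exact this.1

-- z i = number of lengths len with 1 ≤ len, i+len ≤ n and a prefix match of length len at i
lemma z_card (l : List Char) (i : ℕ) (hi : i < l.length) :
    pvZGo l i 0 =
      ((Finset.range (l.length+1)).filter
        (fun len => 1 ≤ len ∧ i + len ≤ l.length ∧ Mt l i 0 len)).card := by
  have hz := z_le l i hi
  have : ((Finset.range (l.length+1)).filter
        (fun len => 1 ≤ len ∧ i + len ≤ l.length ∧ Mt l i 0 len)) =
      Finset.Icc 1 (pvZGo l i 0) := by
    ext len
    simp only [Finset.mem_filter, Finset.mem_range, Finset.mem_Icc]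
    constructor
    · rintro ⟨hr, h1, h2, h3⟩
      exact ⟨h1, (z_iff l i hi len).mpr ⟨h2, h3⟩⟩
    · rintro ⟨h1, h2⟩
      have := (z_iff l i hi len).mp h2
      exact ⟨by omega, h1, this.1, this.2⟩
  rw [this, Nat.card_Icc]
  omega

-- ===== double counting: Σ_e cB e = Σ_i z i =====

lemma fold_add_eq (g : ℕ → ℕ) (xs : List ℕ) (a : ℕ) :
    xs.foldl (fun t i => t + g i) a = a + (xs.map g).sum := by
  induction xs generalizing a with
  | nil => simp
  | cons x xs ih => simp [ih, Nat.add_assoc]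

lemma sum_range_list (g : ℕ → ℕ) (n : ℕ) :
    ((List.range n).map g).sum = ∑ k ∈ Finset.range n, g k := by
  induction n with
  | zero => simp
  | succ n ih => rw [List.range_succ, Finset.sum_range_succ]; simp [ih]

lemma filter_prod_card (n m : ℕ) (P : ℕ → ℕ → Prop) [inst : ∀ i len, Decidable (P i len)] :
    ((Finset.range n ×ˢ Finset.range m).filter (fun q => P q.1 q.2)).card
      = ∑ i ∈ Finset.range n, ((Finset.range m).filter (fun len => P i len)).card := by
  rw [Finset.card_eq_sum_card_fiberwise (f := Prod.fst) (t := Finset.range n)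
    (fun q hq => (Finset.mem_product.mp (Finset.mem_filter.mp hq).1).1)]
  apply Finset.sum_congr rfl
  intro i _
  apply Finset.card_nbij' (i := fun q => q.2) (j := fun len => (i, len))
  · intro q hq
    simp only [Finset.coe_filter, Set.mem_setOf_eq, Finset.mem_filter, Finset.mem_product] at hq ⊢
    obtain ⟨⟨⟨_, h2⟩, h3⟩, h4⟩ := hq
    subst h4
    exact ⟨h2, h3⟩
  · intro len hlen
    rename_i hii
    simp only [Finset.coe_filter, Set.mem_setOf_eq, Finset.mem_filter, Finset.mem_range,
      Finset.mem_product] at hlen ⊢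
    exact ⟨⟨⟨Finset.mem_range.mp hii, hlen.1⟩, hlen.2⟩, trivial⟩
  · intro q hq
    simp only [Finset.coe_filter, Set.mem_setOf_eq] at hq
    have := hq.2
    simp only [Set.mem_setOf_eq]
    exact Prod.ext this.symm rfl
  · intro len _
    rfl

-- grouping the matching pairs by start position
lemma sum_z_eq (l : List Char) :
    (∑ i ∈ Finset.range l.length, pvZGo l i 0) =
      ((Finset.range l.length ×ˢ Finset.range (l.length+1)).filter
        (fun q => 1 ≤ q.2 ∧ q.1 + q.2 ≤ l.length ∧ Mt l q.1 0 q.2)).card := by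
  refine Eq.trans ?_ (filter_prod_card l.length (l.length+1)
    (fun i len => 1 ≤ len ∧ i + len ≤ l.length ∧ Mt l i 0 len)).symm
  apply Finset.sum_congr rfl
  intro i hi
  exact z_card l i (Finset.mem_range.mp hi)

-- grouping the matching pairs by end position
lemma sum_c_eq (l : List Char) :
    (∑ e ∈ Finset.range l.length, cB l e) =
      ((Finset.range l.length ×ˢ Finset.range (l.length+1)).filter
        (fun q => 1 ≤ q.2 ∧ q.2 ≤ q.1 + 1 ∧ Mt l 0 (q.1+1-q.2) q.2)).card := by
  refine Eq.trans ?_ (filter_prod_card l.length (l.length+1)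
    (fun e p => 1 ≤ p ∧ p ≤ e + 1 ∧ Mt l 0 (e+1-p) p)).symm
  apply Finset.sum_congr rfl
  intro e he
  have he' : e < l.length := Finset.mem_range.mp he
  rw [cB]
  congr 1
  ext p
  simp only [Finset.mem_filter, Finset.mem_range]
  constructor
  · rintro ⟨h1, h2, h3⟩
    exact ⟨by omega, h2, by omega, h3⟩
  · rintro ⟨h1, h2, h3, h4⟩
    exact ⟨by omega, h2, h4⟩

lemma card_ST (l : List Char) :
    ((Finset.range l.length ×ˢ Finset.range (l.length+1)).filter
        (fun q => 1 ≤ q.2 ∧ q.1 + q.2 ≤ l.length ∧ Mt l q.1 0 q.2)).card =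
    ((Finset.range l.length ×ˢ Finset.range (l.length+1)).filter
        (fun q => 1 ≤ q.2 ∧ q.2 ≤ q.1 + 1 ∧ Mt l 0 (q.1+1-q.2) q.2)).card := by
  apply Finset.card_nbij' (i := fun q => (q.1 + q.2 - 1, q.2)) (j := fun q => (q.1 + 1 - q.2, q.2))
  · intro q hq
    simp only [Finset.coe_filter, Set.mem_setOf_eq, Finset.mem_filter, Finset.mem_product,
      Finset.mem_range] at hq ⊢
    obtain ⟨⟨h1, h2⟩, h3, h4, h5⟩ := hq
    refine ⟨⟨by omega, by omega⟩, h3, by omega, ?_⟩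
    have e1 : q.1 + q.2 - 1 + 1 - q.2 = q.1 := by omega
    rw [e1]
    exact mt_symm h5
  · intro q hq
    simp only [Finset.coe_filter, Set.mem_setOf_eq, Finset.mem_filter, Finset.mem_product,
      Finset.mem_range] at hq ⊢
    obtain ⟨⟨h1, h2⟩, h3, h4, h5⟩ := hq
    exact ⟨⟨by omega, by omega⟩, h3, by omega, mt_symm h5⟩
  · intro q hq
    simp only [Finset.coe_filter, Set.mem_setOf_eq, Finset.mem_filter, Finset.mem_product,
      Finset.mem_range] at hq
    obtain ⟨⟨h1, h2⟩, h3, h4, h5⟩ := hq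
    simp only [Set.mem_setOf_eq]
    have e1 : q.1 + q.2 - 1 + 1 - q.2 = q.1 := by omega
    exact Prod.ext e1 rfl
  · intro q hq
    simp only [Finset.coe_filter, Set.mem_setOf_eq, Finset.mem_filter, Finset.mem_product,
      Finset.mem_range] at hq
    obtain ⟨⟨h1, h2⟩, h3, h4, h5⟩ := hq
    simp only [Set.mem_setOf_eq]
    have e1 : q.1 + 1 - q.2 + q.2 - 1 = q.1 := by omega
    exact Prod.ext e1 rfl

lemma sum_c_eq_sum_z (l : List Char) :
    (∑ e ∈ Finset.range l.length, cB l e) = ∑ i ∈ Finset.range l.length, pvZGo l i 0 := by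
  rw [sum_z_eq, sum_c_eq, card_ST]

-- ===== A-side: loop invariant =====

def LoopInv (l : List Char) (i j : ℕ) (dp ans : List ℕ) : Prop :=
  dp.length = l.length ∧ ans.length = l.length ∧
  j < i ∧ i ≤ l.length ∧
  Mt l 0 (i-j) j ∧
  (∀ p, j < p → p < i → Mt l 0 (i-p) p → l[p]? ≠ l[i]?) ∧
  (∀ k, k < i → dp.getD k 0 = piF l k) ∧
  (∀ k, i ≤ k → k < l.length → dp.getD k 0 = 0) ∧
  (∀ k, k < i → ans.getD k 0 = cB l k) ∧
  (∀ k, i ≤ k → k < l.length → ans.getD k 0 = 1)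

lemma getD_replicate (n x k : ℕ) : (List.replicate n x).getD k 0 = if k < n then x else 0 := by
  simp only [List.getD_eq_getElem?_getD, List.getElem?_replicate]
  split <;> simp

lemma getD_set_self (xs : List ℕ) (i a : ℕ) (h : i < xs.length) :
    (xs.set i a).getD i 0 = a := by
  simp [List.getD_eq_getElem?_getD, h]

lemma getD_set_ne (xs : List ℕ) (i k a : ℕ) (h : i ≠ k) :
    (xs.set i a).getD k 0 = xs.getD k 0 := by
  simp [List.getD_eq_getElem?_getD, h]

lemma loopA_length (l : List Char) (fuel i j : ℕ) (dp ans : List ℕ) :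
    (pvLoopA l fuel i j dp ans).length = ans.length := by
  induction fuel generalizing i j dp ans with
  | zero => rfl
  | succ fuel ih =>
    unfold pvLoopA
    split
    · split
      · rw [ih]; simp
      · split
        · rw [ih]
        · rw [ih]
    · rfl

-- the three key combinatorial facts used when the loop advances i

lemma no_big_border {l : List Char} {i j : ℕ} (hj : j < i) (hi : i < l.length)
    (hcl : ∀ p, j < p → p < i → Mt l 0 (i-p) p → l[p]? ≠ l[i]?)
    (hc : l[j]? = l[i]?) :
    ∀ p, j + 1 < p → p ≤ i → ¬ Mt l 0 (i+1-p) p := by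
  intro p h1 h2 hmt
  have := (mt_ext (l := l) (i := i) (q := p) (by omega) (by omega)).mp hmt
  exact hcl (p-1) (by omega) (by omega) this.1 this.2

lemma border_succ {l : List Char} {i j : ℕ} (hj : j < i)
    (hb : Mt l 0 (i-j) j) (hc : l[j]? = l[i]?) :
    Mt l 0 (i+1-(j+1)) (j+1) := by
  have : i + 1 - (j+1) = i - j := by omega
  rw [this]
  intro k hk
  rcases Nat.lt_or_ge k j with h | h
  · exact hb k h
  · have ek : k = j := by omega
    rw [ek]
    have e : i - j + j = i := by omega
    rw [e]
    simpa using hc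

lemma piF_match {l : List Char} {i j : ℕ} (hj : j < i) (hi : i < l.length)
    (hb : Mt l 0 (i-j) j)
    (hcl : ∀ p, j < p → p < i → Mt l 0 (i-p) p → l[p]? ≠ l[i]?)
    (hc : l[j]? = l[i]?) :
    piF l i = j + 1 := by
  rw [piF, Nat.findGreatest_eq_iff]
  exact ⟨by omega, fun _ => border_succ hj hb hc,
    fun n h1 h2 => no_big_border hj hi hcl hc n h1 h2⟩

lemma cB_match {l : List Char} {i j : ℕ} (hj : j < i) (hi : i < l.length)
    (hb : Mt l 0 (i-j) j)
    (hcl : ∀ p, j < p → p < i → Mt l 0 (i-p) p → l[p]? ≠ l[i]?)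
    (hc : l[j]? = l[i]?) :
    cB l i = cB l j + 1 := by
  have hbig := no_big_border hj hi hcl hc
  have hb1 : Mt l 0 (i+1-(j+1)) (j+1) := border_succ hj hb hc
  have hset : ((Finset.range (i+2)).filter (fun p => 1 ≤ p ∧ Mt l 0 (i+1-p) p)) =
      insert (i+1) ((Finset.range (j+2)).filter (fun p => 1 ≤ p ∧ Mt l 0 (j+1-p) p)) := by
    ext p
    simp only [Finset.mem_filter, Finset.mem_range, Finset.mem_insert]
    constructor
    · rintro ⟨hr, h1, hmt⟩
      by_cases hpi : p = i+1
      · exact Or.inl hpi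
      · refine Or.inr ?_
        have hps : p ≤ i := by omega
        have hple : p ≤ j+1 := by
          by_contra hgt
          push Not at hgt
          exact hbig p (by omega) hps hmt
        have htr := mt_transfer (l := l) (i := i+1) (j := j+1) (p := p)
          (by simpa using hb1) hple (by omega)
        exact ⟨by omega, h1, htr.mp hmt⟩
    · rintro (rfl | ⟨hr, h1, hmt⟩)
      · refine ⟨by omega, by omega, ?_⟩
        have : i + 1 - (i+1) = 0 := by omega
        rw [this]
        exact mt_self l 0 (i+1)
      · have htr := mt_transfer (l := l) (i := i+1) (j := j+1) (p := p)
          (by simpa using hb1) (by omega) (by omega)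
        exact ⟨by omega, h1, htr.mpr hmt⟩
  rw [cB, cB, hset, Finset.card_insert_of_notMem]
  intro hmem
  have := (Finset.mem_filter.mp hmem).1
  have := Finset.mem_range.mp this
  omega

lemma no_border_null {l : List Char} {i : ℕ} (hi0 : 0 < i) (hi : i < l.length)
    (hcl : ∀ p, 0 < p → p < i → Mt l 0 (i-p) p → l[p]? ≠ l[i]?)
    (hc : l[i]? ≠ l[0]?) :
    ∀ p, 1 ≤ p → p ≤ i → ¬ Mt l 0 (i+1-p) p := by
  intro p h1 h2 hmt
  have hd := (mt_ext (l := l) (i := i) (q := p) h1 (by omega)).mp hmt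
  rcases Nat.eq_or_lt_of_le h1 with he | hlt
  · have : p - 1 = 0 := by omega
    rw [this] at hd
    exact hc hd.2.symm
  · exact hcl (p-1) (by omega) (by omega) hd.1 hd.2

lemma piF_null {l : List Char} {i : ℕ} (hi0 : 0 < i) (hi : i < l.length)
    (hcl : ∀ p, 0 < p → p < i → Mt l 0 (i-p) p → l[p]? ≠ l[i]?)
    (hc : l[i]? ≠ l[0]?) :
    piF l i = 0 := by
  rw [piF, Nat.findGreatest_eq_zero_iff]
  intro p hp1 hp2 hP
  exact no_border_null hi0 hi hcl hc p hp1 hp2 hP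

lemma cB_null {l : List Char} {i : ℕ} (hi0 : 0 < i) (hi : i < l.length)
    (hcl : ∀ p, 0 < p → p < i → Mt l 0 (i-p) p → l[p]? ≠ l[i]?)
    (hc : l[i]? ≠ l[0]?) :
    cB l i = 1 := by
  have hset : ((Finset.range (i+2)).filter (fun p => 1 ≤ p ∧ Mt l 0 (i+1-p) p)) = {i+1} := by
    ext p
    simp only [Finset.mem_filter, Finset.mem_range, Finset.mem_singleton]
    constructor
    · rintro ⟨hr, h1, hmt⟩
      by_contra hne
      exact no_border_null hi0 hi hcl hc p h1 (by omega) hmt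
    · rintro rfl
      refine ⟨by omega, by omega, ?_⟩
      have : i + 1 - (i+1) = 0 := by omega
      rw [this]
      exact mt_self l 0 (i+1)
  rw [cB, hset, Finset.card_singleton]

lemma cB_zero (l : List Char) : cB l 0 = 1 := by
  have hset : ((Finset.range 2).filter (fun p => 1 ≤ p ∧ Mt l 0 (0+1-p) p)) = {1} := by
    ext p
    simp only [Finset.mem_filter, Finset.mem_range, Finset.mem_singleton]
    constructor
    · rintro ⟨hr, h1, _⟩
      omega
    · rintro rfl
      exact ⟨by omega, by omega, mt_self l 0 1⟩
  rw [cB, hset, Finset.card_singleton]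

lemma piF_zero (l : List Char) : piF l 0 = 0 := rfl

lemma piF_border (l : List Char) (e : ℕ) : Mt l 0 (e+1 - piF l e) (piF l e) := by
  by_cases h : piF l e = 0
  · rw [h]; exact mt_zero l 0 (e+1-0)
  · exact ((Nat.findGreatest_eq_iff (P := fun p => Mt l 0 (e+1-p) p)
      (k := e) (m := piF l e)).mp rfl).2.1 h

lemma piF_le (l : List Char) (e : ℕ) : piF l e ≤ e := Nat.findGreatest_le e

-- the main loop lemma
lemma loopA_spec (l : List Char) : ∀ (fuel : ℕ), ∀ (i j : ℕ) (dp ans : List ℕ),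
    LoopInv l i j dp ans → 2 * (l.length - i) + j + 1 ≤ fuel →
    ∀ k, k < l.length → (pvLoopA l fuel i j dp ans).getD k 0 = cB l k := by
  intro fuel
  induction fuel with
  | zero => intro i j dp ans _ hfuel; omega
  | succ fuel ih =>
    intro i j dp ans hinv hfuel
    obtain ⟨hdl, hal, hji, hin, hb, hcl, hdp, hdp0, hans, hans1⟩ := hinv
    rw [pvLoopA]
    split_ifs with hi hcq hj0
    · -- match branch: s[i] == s[j]
      apply ih (i+1) (j+1) _ _ ?_ (by omega)
      refine ⟨by simpa using hdl, by simpa using hal, by omega, by omega,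
        border_succ hji hb hcq.symm, ?_, ?_, ?_, ?_, ?_⟩
      · intro p h1 h2 hmt
        exact absurd hmt (no_big_border hji hi hcl hcq.symm p h1 (by omega))
      · intro k hk
        by_cases hk' : k = i
        · subst hk'
          rw [getD_set_self dp k (j+1) (by omega), piF_match hji hi hb hcl hcq.symm]
        · rw [getD_set_ne dp i k (j+1) (fun h => hk' h.symm)]
          exact hdp k (by omega)
      · intro k hk1 hk2
        rw [getD_set_ne dp i k (j+1) (by omega)]
        exact hdp0 k (by omega) hk2
      · intro k hk
        by_cases hk' : k = i
        · subst hk'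
          rw [getD_set_self ans k (ans.getD k 0 + ans.getD j 0) (by omega),
            hans1 k le_rfl hi, hans j hji, cB_match hji hi hb hcl hcq.symm]
          omega
        · rw [getD_set_ne ans i k _ (fun h => hk' h.symm)]
          exact hans k (by omega)
      · intro k hk1 hk2
        rw [getD_set_ne ans i k _ (by omega)]
        exact hans1 k (by omega) hk2
    · -- mismatch, j > 0: fall back to dp[j-1]
      have hjval : dp.getD (j-1) 0 = piF l (j-1) := hdp (j-1) (by omega)
      have hj'le : piF l (j-1) ≤ j - 1 := piF_le l (j-1)
      have hPB : Mt l 0 (j - piF l (j-1)) (piF l (j-1)) := by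
        have := piF_border l (j-1)
        have e1 : j - 1 + 1 = j := by omega
        rwa [e1] at this
      apply ih i (dp.getD (j-1) 0) dp ans ?_ (by omega)
      rw [hjval]
      refine ⟨hdl, hal, by omega, hin,
        (mt_transfer (l := l) (i := i) (j := j) hb (by omega) (by omega)).mpr hPB,
        ?_, hdp, hdp0, hans, hans1⟩
      intro p h1 h2 hmt
      rcases Nat.lt_trichotomy p j with hpj | hpj | hpj
      · -- piF l (j-1) < p < j: impossible, p would be a larger border of the j-prefix
        exfalso
        have htr := (mt_transfer (l := l) (i := i) (j := j) hb (by omega) (by omega)).mp hmt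
        have hP : Mt l 0 (j - 1 + 1 - p) p := by
          have e1 : j - 1 + 1 = j := by omega
          rwa [e1]
        have := Nat.le_findGreatest (P := fun p => Mt l 0 (j-1+1-p) p) (n := j-1) (m := p)
          (by omega) hP
        have : p ≤ piF l (j-1) := this
        omega
      · subst hpj
        exact fun h => hcq h.symm
      · exact hcl p hpj h2 hmt
    · -- mismatch, j = 0: advance i
      have hj : j = 0 := by omega
      subst hj
      have hi0 : 0 < i := hji
      have hc : l[i]? ≠ l[0]? := hcq
      have hnb := no_border_null hi0 hi hcl hc
      apply ih (i+1) 0 dp ans ?_ (by omega)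
      refine ⟨hdl, hal, by omega, by omega, mt_zero l 0 (i+1-0), ?_, ?_, ?_, ?_, ?_⟩
      · intro p h1 h2 hmt
        exact absurd hmt (hnb p h1 (by omega))
      · intro k hk
        by_cases hk' : k = i
        · subst hk'
          rw [hdp0 k le_rfl hi, piF_null hi0 hi hcl hc]
        · exact hdp k (by omega)
      · intro k hk1 hk2
        exact hdp0 k (by omega) hk2
      · intro k hk
        by_cases hk' : k = i
        · subst hk'
          rw [hans1 k le_rfl hi, cB_null hi0 hi hcl hc]
        · exact hans k (by omega)
      · intro k hk1 hk2
        exact hans1 k (by omega) hk2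
    · -- i ≥ n: loop exits, ans is final
      intro k hk
      exact hans k (by omega)

lemma listsum_eq (xs : List ℕ) (g : ℕ → ℕ) (h : ∀ k, k < xs.length → xs.getD k 0 = g k) :
    xs.sum = ∑ k ∈ Finset.range xs.length, g k := by
  induction xs using List.reverseRecOn with
  | nil => simp
  | append_singleton xs x ih =>
    have hlen : (xs ++ [x]).length = xs.length + 1 := by simp
    rw [hlen, Finset.sum_range_succ]
    have hx : x = g xs.length := by
      have := h xs.length (by simp)
      simpa [List.getD_eq_getElem?_getD, List.getElem?_append_right] using this
    have hxs : xs.sum = ∑ k ∈ Finset.range xs.length, g k := by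
      apply ih
      intro k hk
      have := h k (by simp; omega)
      rwa [List.getD_eq_getElem?_getD, List.getElem?_append_left hk,
        ← List.getD_eq_getElem?_getD] at this
    simp [hxs, hx]

-- assembling both sides

lemma sumScoresA_eq (s : String) :
    sumScores s = ((∑ e ∈ Finset.range s.toList.length, cB s.toList e : ℕ) : Int) := by
  unfold sumScores
  show ((pvLoopA s.toList (2*s.toList.length+1) 1 0 (List.replicate s.toList.length 0)
      (List.replicate s.toList.length 1)).sum : ℕ) = ((_ : ℕ) : Int)
  by_cases hn : s.toList.length = 0
  · have hl : s.toList = [] := List.eq_nil_of_length_eq_zero hn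
    rw [hl]
    simp [pvLoopA]
  · have hpos : 0 < s.toList.length := by omega
    have hinv0 : LoopInv s.toList 1 0 (List.replicate s.toList.length 0)
        (List.replicate s.toList.length 1) := by
      refine ⟨by simp, by simp, by omega, by omega, mt_zero _ 0 1, ?_, ?_, ?_, ?_, ?_⟩
      · intro p h1 h2 _
        exact absurd h2 (by omega)
      · intro k hk
        have hk0 : k = 0 := by omega
        subst hk0
        rw [piF_zero, getD_replicate, if_pos hpos]
      · intro k hk1 hk2
        rw [getD_replicate, if_pos hk2]
      · intro k hk
        have hk0 : k = 0 := by omega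
        subst hk0
        rw [cB_zero, getD_replicate, if_pos hpos]
      · intro k hk1 hk2
        rw [getD_replicate, if_pos hk2]
    have hres := loopA_spec s.toList (2*s.toList.length+1) 1 0 _ _ hinv0 (by omega)
    have hlen : (pvLoopA s.toList (2*s.toList.length+1) 1 0
        (List.replicate s.toList.length 0) (List.replicate s.toList.length 1)).length
        = s.toList.length := by
      rw [loopA_length]; simp
    rw [listsum_eq _ (cB s.toList) (fun k hk => hres k (by rwa [hlen] at hk)), hlen]

lemma sumScoresB_eq (s : String) :
    sumScores_alt s = ((∑ i ∈ Finset.range s.toList.length, pvZGo s.toList i 0 : ℕ) : Int) := by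
  unfold sumScores_alt
  show (((List.range s.toList.length).foldl (fun t i => t + pvZGo s.toList i 0) 0 : ℕ) : Int) = _
  rw [fold_add_eq, sum_range_list]
  simp

-- ===== VERDICT (by name: the statement is the Claim_ definition above) =====
theorem sumScores_spec : Claim_equal_sumScores := by
  intro s _
  unfold Spec_sumScores
  rw [sumScoresA_eq, sumScoresB_eq, sum_c_eq_sum_z]
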